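-- pv_equiv track=rewrite | github.com/Lee-Hughs/checkers.py | train.py | get_p_distance
-- ===== SOURCE A (Python) =====
-- def get_p_distance(board, player, w):
--     score = 0
--     for (i, row) in enumerate(board):
--         for (j, value) in enumerate(row):
--             if(value == None):
--                 continue
--             if(value == player[1]):
--                 if(player == 'Rr'):
--                     score += 8 - i
--                 else:
--                     score += i
--     return score
-- ===== SOURCE B (Python) =====
-- def get_p_distance(board, player, w):
--     piece = player[1]
--     c = m = 0                      # c: pieces seen so far (deeper rows), m: sum of their row indices
--     for row in reversed(board):
--         m += c                     # every deeper piece's index grows by 1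
--         c += row.count(piece)
--     return 8 * c - m if player == 'Rr' else m
-- ===== Notes on version B (the rewrite author's own statement) =====
-- stated objective: faster
-- what changed: Replaced the index-based nested accumulate-with-branch by an index-free back-to-front scan maintaining (count, first-moment) -- m += c per row shifts deeper pieces' indices, counting per row with C-level list.count -- with the player-dependent weighting recovered once at the end as 8*c - m or m.
-- outside the precondition, e.g. on get_p_distance([[None]], 'R', 0): A returns 0, B raises IndexError; on get_p_distance([], '', 3): A returns 0, B raises IndexError
import Mathlib
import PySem

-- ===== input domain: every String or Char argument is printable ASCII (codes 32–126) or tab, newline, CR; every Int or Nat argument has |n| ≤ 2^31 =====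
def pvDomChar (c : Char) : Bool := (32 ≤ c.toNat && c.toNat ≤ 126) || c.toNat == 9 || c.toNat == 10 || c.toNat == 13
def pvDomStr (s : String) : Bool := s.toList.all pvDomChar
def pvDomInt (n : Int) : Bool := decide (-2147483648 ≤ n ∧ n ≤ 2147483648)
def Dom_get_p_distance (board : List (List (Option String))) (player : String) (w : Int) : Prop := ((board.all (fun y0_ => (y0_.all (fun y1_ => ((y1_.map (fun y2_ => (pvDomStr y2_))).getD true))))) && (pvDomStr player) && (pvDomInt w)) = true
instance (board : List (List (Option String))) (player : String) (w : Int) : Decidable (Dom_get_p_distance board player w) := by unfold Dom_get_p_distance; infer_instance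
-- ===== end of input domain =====

-- B replaces A's indexed nested per-cell branch by an index-free back-to-front (count, moment) scan recombined once at the end; objective: faster (measured, constant-factor).

-- ===== PORT A =====
def get_p_distance (board : List (List (Option String))) (player : String) (w : Int) : Int :=
  (PySem.List.enumerate board 0).foldl (fun score ir =>
    (PySem.List.enumerate ir.2 0).foldl (fun score jv =>
      match jv.2 with
      | none => score                                  -- value == None: continue
      | some v =>
        if some v = (PySem.Str.pyGet? player 1).map Char.toString then  -- value == player[1]
          (if player = "Rr" then score + (8 - ir.1) else score + ir.1)
        else score) score) 0

-- ===== PORT B =====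
-- for row in reversed(board): m += c; c += row.count(piece)
def get_p_distance_alt (board : List (List (Option String))) (player : String) (w : Int) : Int :=
  match PySem.Str.pyGet? player 1 with
  | none => 0        -- piece = player[1] raises IndexError in Python B; excluded by Pre_
  | some piece =>
    let cm := board.reverse.foldl (fun (cm : Int × Int) row =>
      (cm.1 + (PySem.List.count row (some piece.toString) : Int), cm.2 + cm.1)) (0, 0)
    if player = "Rr" then 8 * cm.1 - cm.2 else cm.2

-- ===== PRECONDITION & SPEC =====
-- Pre_ requires len(player) >= 2: with a shorter player, B's hoisted player[1] lookup raises
-- IndexError even on boards whose cells are all None (where A never reads player[1] and returns 0).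
def Pre_get_p_distance (board : List (List (Option String))) (player : String) (w : Int) : Prop :=
  2 ≤ player.length
instance (board : List (List (Option String))) (player : String) (w : Int) : Decidable (Pre_get_p_distance board player w) := by unfold Pre_get_p_distance; infer_instance
def pvWitness_get_p_distance : List (List (Option String)) × String × Int :=
  ([[some "r", none], [none, some "b"]], "Rr", 0)
def Spec_get_p_distance (board : List (List (Option String))) (player : String) (w : Int) (out : Int) : Prop := out = get_p_distance_alt board player w
instance (board : List (List (Option String))) (player : String) (w : Int) (out : Int) : Decidable (Spec_get_p_distance board player w out) := by unfold Spec_get_p_distance; infer_instance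

-- ===== CLAIM =====
def Claim_equal_get_p_distance : Prop := ∀ (board : List (List (Option String))) (player : String) (w : Int), Dom_get_p_distance board player w → Pre_get_p_distance board player w → Spec_get_p_distance board player w (get_p_distance board player w)

-- ===== LEMMAS AND PROOFS =====

-- A's inner loop over one row adds the row's weight once per cell equal to the piece.
theorem inner_count (player : String) (piece : Char) (row : List (Option String)) (i : Int) :
    ∀ (s acc : Int),
      (PySem.List.enumerate row s).foldl (fun score jv =>
        match jv.2 with
        | none => score
        | some v =>
          if some v = some piece.toString then
            (if player = "Rr" then score + (8 - i) else score + i)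
          else score) acc
      = acc + (if player = "Rr" then 8 - i else i) *
          ((row.count (some piece.toString) : Nat) : Int) := by
  induction row with
  | nil => intro s acc; simp [PySem.List.enumerate_nil]
  | cons x xs ih =>
    intro s acc
    rw [PySem.List.enumerate_cons]
    simp only [List.foldl_cons]
    cases x with
    | none =>
      rw [ih]
      simp [List.count_cons]
    | some v =>
      simp only [ih, List.count_cons]
      by_cases hv : v = piece.toString
      · simp only [hv]
        simp
        push_cast
        split_ifs <;> ring
      · have hv2 : v ≠ String.singleton piece := by
          simpa [Char.toString] using hv
        simp [hv2]

-- A's outer loop, started at row index s with accumulator acc, equals acc plus the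
-- recombination of B's (count, moment) pair: count weighted by (8 - s) resp. s, moment
-- subtracted resp. added.
theorem outer_fold (player : String) (piece : Char) (board : List (List (Option String))) :
    ∀ (s acc : Int),
      (PySem.List.enumerate board s).foldl (fun score ir =>
        (PySem.List.enumerate ir.2 0).foldl (fun score jv =>
          match jv.2 with
          | none => score
          | some v =>
            if some v = some piece.toString then
              (if player = "Rr" then score + (8 - ir.1) else score + ir.1)
            else score) score) acc
      = acc +
        (let cm := board.reverse.foldl (fun (cm : Int × Int) row =>
            (cm.1 + (PySem.List.count row (some piece.toString) : Int), cm.2 + cm.1)) (0, 0)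
         if player = "Rr" then (8 - s) * cm.1 - cm.2 else s * cm.1 + cm.2) := by
  induction board with
  | nil => intro s acc; simp [PySem.List.enumerate_nil]
  | cons row rest ih =>
    intro s acc
    rw [PySem.List.enumerate_cons]
    simp only [List.foldl_cons, List.reverse_cons, List.foldl_append, List.foldl_nil]
    rw [inner_count player piece row s 0 acc, ih]
    simp only [PySem.List.count]
    split_ifs <;> ring

-- ===== VERDICT =====
theorem get_p_distance_spec : Claim_equal_get_p_distance := by
  intro board player w _ hpre
  unfold Spec_get_p_distance get_p_distance get_p_distance_alt
  obtain ⟨piece, hc⟩ : ∃ c, PySem.Str.pyGet? player 1 = some c := by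
    have h2 : 2 ≤ player.length := hpre
    have hl : 1 < player.toList.length := by
      have := player.length_toList
      omega
    refine ⟨player.toList[1], ?_⟩
    have := PySem.Str.pyGet?_natCast player (1 : Nat)
    simp only [Nat.cast_one] at this
    rw [this]
    exact List.getElem?_eq_getElem hl
  simp only [hc, Option.map_some]
  rw [outer_fold player piece board 0 0]
  simp
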